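-- pv_equiv track=rewrite | github.com/MarcTremolieres/fibosum | fibosum.py | fibosum_calcule
-- ===== SOURCE A (Python) =====
-- def fibosum_calcule(N, M):
--     a = 0
--     b = 1
--     modulo = 1000000007
--     if N < 2:
--         if M < 2:
--             return M - N + 1
--         somme = 1
--         for _ in range(2, M + 1):
--             a, b = b, a
--             b += a
--             if b >= modulo: b = b % modulo
--             somme += b
--             if somme >= modulo: somme = somme % modulo
--         return somme
--     somme = 0
--     for _ in range(2, N):
--         a, b = b, a
--         b += a
--
--         if b >= modulo: b = b % modulo
--     for _ in range(N, M + 1):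
--         a, b = b, a
--         b += a
--         if b >= modulo: b = b % modulo
--         somme += b
--         if somme >= modulo: somme = somme % modulo
--     return somme
-- ===== SOURCE B (Python) =====
-- def _fd(n):
--     # fast doubling: returns (F(n) % p, F(n+1) % p), 1e9+7, with F(0)=0, F(1)=1
--     if n == 0:
--         return (0, 1)
--     a, b = _fd(n // 2)
--     c = a * (2 * b - a) % 1000000007
--     d = (a * a + b * b) % 1000000007
--     if n % 2 == 0:
--         return (c, d)
--     return (d, (c + d) % 1000000007)
--
-- def fibosum_calcule(N, M):
--     p = 1000000007
--     if N < 2: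
--         if M < 2:
--             return M - N + 1
--         return (_fd(M + 2)[0] - 1) % p
--     if M < N:
--         return 0
--     return (_fd(M + 2)[0] - _fd(N + 1)[0]) % p
-- ===== Notes on version B (the rewrite author's own statement) =====
-- stated objective: faster
-- what changed: Replaced the O(M) iterative Fibonacci loops by fast-doubling computation of F(n) mod p together with the prefix-sum identity sum F_N..F_M = F(M+2) - F(N+1).
import Mathlib
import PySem

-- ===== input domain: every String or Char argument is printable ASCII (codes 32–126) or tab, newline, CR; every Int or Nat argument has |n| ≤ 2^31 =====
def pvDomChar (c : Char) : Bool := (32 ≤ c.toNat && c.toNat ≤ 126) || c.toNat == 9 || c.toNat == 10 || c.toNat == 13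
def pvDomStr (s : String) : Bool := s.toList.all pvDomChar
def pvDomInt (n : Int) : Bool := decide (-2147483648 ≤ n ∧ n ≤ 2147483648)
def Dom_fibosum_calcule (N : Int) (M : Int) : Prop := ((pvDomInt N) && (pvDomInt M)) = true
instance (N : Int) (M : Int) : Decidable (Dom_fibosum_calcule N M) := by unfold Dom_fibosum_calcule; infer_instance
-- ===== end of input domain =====

-- B replaces A's O(M) Fibonacci loops by O(log M) fast doubling plus the prefix-sum identity
-- sum F_N..F_M = F(M+2) - F(N+1); equal return values proved on the whole domain.

-- ===== PORT A =====
-- one iteration of A's fib-advancing loop body: a, b = b, a; b += a; if b >= modulo: b %= modulo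
def pvStep1 (s : Int × Int) : Int × Int :=
  let b := s.1 + s.2
  (s.2, if b ≥ 1000000007 then PySem.Int.mod b 1000000007 else b)

-- one iteration of A's summing loop body (state ((a, b), somme))
def pvStep2 (s : (Int × Int) × Int) : (Int × Int) × Int :=
  let ab := pvStep1 s.1
  let somme := s.2 + ab.2
  (ab, if somme ≥ 1000000007 then PySem.Int.mod somme 1000000007 else somme)

def fibosum_calcule (N : Int) (M : Int) : Int :=
  if N < 2 then
    if M < 2 then M - N + 1
    else ((PySem.List.pyRange 2 (M + 1) 1).foldl (fun s _ => pvStep2 s) ((0, 1), 1)).2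
  else
    let ab := (PySem.List.pyRange 2 N 1).foldl (fun s _ => pvStep1 s) (0, 1)
    ((PySem.List.pyRange N (M + 1) 1).foldl (fun s _ => pvStep2 s) (ab, 0)).2

-- ===== PORT B =====
-- fast doubling: pvFd n = (F(n) % p, F(n+1) % p)
def pvFd : Nat → Int × Int
  | 0 => (0, 1)
  | n + 1 =>
    let ab := pvFd ((n + 1) / 2)
    let c := PySem.Int.mod (ab.1 * (2 * ab.2 - ab.1)) 1000000007
    let d := PySem.Int.mod (ab.1 * ab.1 + ab.2 * ab.2) 1000000007
    if (n + 1) % 2 = 0 then (c, d) else (d, PySem.Int.mod (c + d) 1000000007)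
decreasing_by exact Nat.div_lt_self (Nat.succ_pos n) one_lt_two

def fibosum_calcule_alt (N : Int) (M : Int) : Int :=
  if N < 2 then
    if M < 2 then M - N + 1
    else PySem.Int.mod ((pvFd (M + 2).toNat).1 - 1) 1000000007
  else if M < N then 0
  else PySem.Int.mod ((pvFd (M + 2).toNat).1 - (pvFd (N + 1).toNat).1) 1000000007

-- ===== PRECONDITION & SPEC =====
def Spec_fibosum_calcule (N : Int) (M : Int) (out : Int) : Prop := out = fibosum_calcule_alt N M
instance (N : Int) (M : Int) (out : Int) : Decidable (Spec_fibosum_calcule N M out) := by unfold Spec_fibosum_calcule; infer_instance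

-- ===== CLAIM (what is proved, stated in full; the proofs are below) =====
def Claim_equal_fibosum_calcule : Prop := ∀ (N : Int) (M : Int), Dom_fibosum_calcule N M → Spec_fibosum_calcule N M (fibosum_calcule N M)

-- ===== LEMMAS AND PROOFS =====

-- a foldl that ignores the list elements is an iterate of the step over the list's length
lemma pvFoldlConst {α : Type} (f : α → α) : ∀ (l : List Int) (s : α),
    l.foldl (fun t _ => f t) s = f^[l.length] s
  | [], _ => rfl
  | _ :: l, s => by
    simp [List.foldl_cons, pvFoldlConst f l, Function.iterate_succ_apply]

lemma pvStep1_mods (x y : ℕ) (hx : x < 1000000007) (hy : y < 1000000007) :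
    pvStep1 ((x : ℤ), (y : ℤ)) = ((y : ℤ), (((x + y) % 1000000007 : ℕ) : ℤ)) := by
  simp only [pvStep1]
  split_ifs with h
  · rw [PySem.Int.mod_eq_emod_of_pos (by norm_num)]
    norm_cast
  · have hlt : x + y < 1000000007 := by omega
    rw [Nat.mod_eq_of_lt hlt]; push_cast; ring

lemma pvStep2_mods (x y s : ℕ) (hx : x < 1000000007) (hy : y < 1000000007)
    (hs : s < 1000000007) :
    pvStep2 (((x : ℤ), (y : ℤ)), (s : ℤ)) =
      (((y : ℤ), (((x + y) % 1000000007 : ℕ) : ℤ)),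
        (((s + (x + y) % 1000000007) % 1000000007 : ℕ) : ℤ)) := by
  simp only [pvStep2, pvStep1_mods x y hx hy]
  split_ifs with h
  · rw [PySem.Int.mod_eq_emod_of_pos (by norm_num)]
    norm_cast
  · have hlt : s + (x + y) % 1000000007 < 1000000007 := by omega
    rw [Nat.mod_eq_of_lt hlt]; push_cast; ring

lemma pvLoop1 (k : ℕ) :
    pvStep1^[k] (0, 1) = ((↑(Nat.fib k % 1000000007) : ℤ), (↑(Nat.fib (k + 1) % 1000000007) : ℤ)) := by
  induction k with
  | zero => simp [Nat.fib]
  | succ k ih =>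
    rw [Function.iterate_succ_apply', ih,
      pvStep1_mods _ _ (Nat.mod_lt _ (by norm_num)) (Nat.mod_lt _ (by norm_num))]
    rw [← Nat.add_mod, ← Nat.fib_add_two]

lemma pvLoop2 (n : ℕ) : ∀ (j s : ℕ), s < 1000000007 →
    pvStep2^[j] (((↑(Nat.fib n % 1000000007) : ℤ), (↑(Nat.fib (n + 1) % 1000000007) : ℤ)), (s : ℤ)) =
      (((↑(Nat.fib (n + j) % 1000000007) : ℤ), (↑(Nat.fib (n + j + 1) % 1000000007) : ℤ)),
        (↑((s + (Nat.fib (n + j + 3) - Nat.fib (n + 3))) % 1000000007) : ℤ))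
  | 0, s, hs => by
    simp [Nat.mod_eq_of_lt hs]
  | j + 1, s, hs => by
    rw [Function.iterate_succ_apply,
      pvStep2_mods _ _ _ (Nat.mod_lt _ (by norm_num)) (Nat.mod_lt _ (by norm_num)) hs,
      ← Nat.add_mod, ← Nat.fib_add_two,
      pvLoop2 (n + 1) j _ (Nat.mod_lt _ (by norm_num))]
    have e1 : n + 1 + j = n + (j + 1) := by omega
    have e2 : n + 1 + 3 = n + 4 := by omega
    rw [e1, e2]
    congr 1
    have hC : Nat.fib (n + 4) = Nat.fib (n + 2) + Nat.fib (n + 3) := by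
      rw [show n + 4 = (n + 2) + 2 by ring, Nat.fib_add_two]
    have hF : Nat.fib (n + 4) ≤ Nat.fib (n + (j + 1) + 3) := Nat.fib_mono (by omega)
    have hB : Nat.fib (n + 3) ≤ Nat.fib (n + 4) := Nat.fib_mono (by omega)
    exact Nat.cast_inj.mpr (by omega)

-- congruence mod p transfers through PySem.Int.mod for subtraction of reduced residues
lemma pvSubMod (u v : ℕ) (hv : v ≤ u) :
    PySem.Int.mod ((↑(u % 1000000007) : ℤ) - (↑(v % 1000000007) : ℤ)) 1000000007 =
      (↑((u - v) % 1000000007) : ℤ) := by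
  rw [PySem.Int.mod_eq_emod_of_pos (by norm_num)]
  have h1 : ((↑(u % 1000000007) : ℤ) - (↑(v % 1000000007) : ℤ)) % 1000000007 =
      ((u : ℤ) - (v : ℤ)) % 1000000007 := by
    push_cast
    rw [← Int.sub_emod]
  rw [h1]
  have h2 : ((u - v : ℕ) : ℤ) = (u : ℤ) - (v : ℤ) := by
    push_cast [hv]; ring
  rw [← h2]
  norm_cast

lemma pvFd_eq (n : ℕ) :
    pvFd n = ((↑(Nat.fib n % 1000000007) : ℤ), (↑(Nat.fib (n + 1) % 1000000007) : ℤ)) := by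
  induction n using Nat.strong_induction_on with
  | _ n ih =>
    match n with
    | 0 => simp [pvFd, Nat.fib]
    | m + 1 =>
      rw [pvFd]
      have hq := ih ((m + 1) / 2) (Nat.div_lt_self (Nat.succ_pos m) one_lt_two)
      set q := (m + 1) / 2 with hqdef
      rw [hq]
      simp only
      set x : ℤ := (↑(Nat.fib q % 1000000007) : ℤ) with hx
      set y : ℤ := (↑(Nat.fib (q + 1) % 1000000007) : ℤ) with hy
      have hxc : x ≡ (Nat.fib q : ℤ) [ZMOD 1000000007] := by
        have hx' : x = (Nat.fib q : ℤ) % 1000000007 := by rw [hx]; norm_cast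
        rw [hx']
        exact Int.emod_emod_of_dvd _ dvd_rfl
      have hyc : y ≡ (Nat.fib (q + 1) : ℤ) [ZMOD 1000000007] := by
        have hy' : y = (Nat.fib (q + 1) : ℤ) % 1000000007 := by rw [hy]; norm_cast
        rw [hy']
        exact Int.emod_emod_of_dvd _ dvd_rfl
      have hfibs : Nat.fib q ≤ 2 * Nat.fib (q + 1) := by
        have := Nat.fib_mono (show q ≤ q + 1 by omega)
        omega
      have hc : PySem.Int.mod (x * (2 * y - x)) 1000000007 =
          (↑(Nat.fib (2 * q) % 1000000007) : ℤ) := by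
        rw [PySem.Int.mod_eq_emod_of_pos (by norm_num)]
        have hcast : (↑(Nat.fib (2 * q) % 1000000007) : ℤ) = (Nat.fib (2 * q) : ℤ) % 1000000007 := by
          norm_cast
        rw [hcast]
        have heq : (Nat.fib q : ℤ) * (2 * (Nat.fib (q + 1) : ℤ) - (Nat.fib q : ℤ)) =
            (Nat.fib (2 * q) : ℤ) := by
          rw [Nat.fib_two_mul]; push_cast [hfibs]; ring
        exact heq ▸ (hxc.mul ((hyc.mul_left 2).sub hxc))
      have hd : PySem.Int.mod (x * x + y * y) 1000000007 =
          (↑(Nat.fib (2 * q + 1) % 1000000007) : ℤ) := by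
        rw [PySem.Int.mod_eq_emod_of_pos (by norm_num)]
        have hcast : (↑(Nat.fib (2 * q + 1) % 1000000007) : ℤ) =
            (Nat.fib (2 * q + 1) : ℤ) % 1000000007 := by norm_cast
        rw [hcast]
        have heq : (Nat.fib q : ℤ) * (Nat.fib q : ℤ) +
            (Nat.fib (q + 1) : ℤ) * (Nat.fib (q + 1) : ℤ) = (Nat.fib (2 * q + 1) : ℤ) := by
          rw [Nat.fib_two_mul_add_one]; push_cast; ring
        exact heq ▸ ((hxc.mul hxc).add (hyc.mul hyc))
      rw [hc, hd]
      rcases Nat.even_or_odd (m + 1) with he | ho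
      · have h2 : (m + 1) % 2 = 0 := Nat.even_iff.mp he
        have h2q : 2 * q = m + 1 := by omega
        simp only [h2, if_true]
        rw [h2q]
      · have h2 : (m + 1) % 2 = 1 := Nat.odd_iff.mp ho
        have h2q : 2 * q + 1 = m + 1 := by omega
        simp only [h2]
        rw [if_neg (by omega)]
        have hsum : PySem.Int.mod ((↑(Nat.fib (2 * q) % 1000000007) : ℤ) +
            (↑(Nat.fib (2 * q + 1) % 1000000007) : ℤ)) 1000000007 =
            (↑(Nat.fib (2 * q + 2) % 1000000007) : ℤ) := by
          rw [PySem.Int.mod_eq_emod_of_pos (by norm_num)]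
          norm_cast
          rw [← Nat.add_mod, ← Nat.fib_add_two]
        rw [hsum, h2q, show 2 * q + 2 = m + 1 + 1 by omega]

-- =====  the verdict =====
theorem fibosum_calcule_spec : Claim_equal_fibosum_calcule := by
  intro N M _
  unfold Spec_fibosum_calcule fibosum_calcule fibosum_calcule_alt
  by_cases hN : N < 2
  · by_cases hM : M < 2
    · simp [hN, hM]
    · simp only [hN, hM, if_true, if_false]
      rw [pvFoldlConst, PySem.List.length_pyRange_one]
      have h01 : (((0 : ℤ), (1 : ℤ)), (1 : ℤ)) =
          (((↑(Nat.fib 0 % 1000000007) : ℤ), (↑(Nat.fib (0 + 1) % 1000000007) : ℤ)), ((1 : ℕ) : ℤ)) := by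
        norm_num [Nat.fib]
      rw [h01, pvLoop2 0 _ 1 (by norm_num)]
      set j := (M + 1 - 2).toNat with hj
      have hm : (M + 2).toNat = j + 3 := by omega
      rw [hm]
      have hf1 : Nat.fib 3 ≤ Nat.fib (j + 3) := Nat.fib_mono (by omega)
      have hf3' : Nat.fib 3 = 2 := by decide
      rw [pvFd_eq (j + 3)]
      rw [show ((↑(Nat.fib (j + 3) % 1000000007) : ℤ) - 1) =
          ((↑(Nat.fib (j + 3) % 1000000007) : ℤ) - (↑((1 : ℕ) % 1000000007) : ℤ)) by norm_num,
        pvSubMod _ _ (by omega)]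
      have hf03 : Nat.fib (0 + 3) = 2 := by decide
      have he : Nat.fib (0 + j + 3) = Nat.fib (j + 3) := by rw [Nat.zero_add]
      exact Nat.cast_inj.mpr (by omega)
  · simp only [hN, if_false]
    rw [pvFoldlConst, pvFoldlConst, PySem.List.length_pyRange_one, PySem.List.length_pyRange_one,
      pvLoop1]
    set k := (N - 2).toNat with hk
    rw [show ((((↑(Nat.fib k % 1000000007) : ℤ), (↑(Nat.fib (k + 1) % 1000000007) : ℤ)), (0 : ℤ))) =
        (((↑(Nat.fib k % 1000000007) : ℤ), (↑(Nat.fib (k + 1) % 1000000007) : ℤ)), ((0 : ℕ) : ℤ)) by norm_num,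
      pvLoop2 k _ 0 (by norm_num)]
    set j := (M + 1 - N).toNat with hj
    by_cases hMN : M < N
    · have hj0 : j = 0 := by omega
      simp [hj0, hMN]
    · simp only [hMN, if_false]
      rw [pvFd_eq, pvFd_eq]
      have hm2 : (M + 2).toNat = k + j + 3 := by omega
      have hn1 : (N + 1).toNat = k + 3 := by omega
      rw [hm2, hn1, pvSubMod _ _ (Nat.fib_mono (by omega))]
      norm_num
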